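-- pv_equiv track=rewrite | github.com/field-4d/cloud | Field4D_Site/backend_fastapi/routers/experiment_summary.py | _label_counts_from_map
-- ===== SOURCE A (Python) =====
-- def _label_counts_from_map(sensor_label_map: dict[str, list[str]]) -> dict[str, int]:
--     """Count sensors per label; each sensor contributes once per label in its list (multi-label safe)."""
--     counts: dict[str, int] = {}
--     for labels in sensor_label_map.values():
--         for lab in labels:
--             s = str(lab).strip()
--             if s:
--                 counts[s] = counts.get(s, 0) + 1
--     return dict(sorted(counts.items()))
-- ===== SOURCE B (Python) =====
-- from itertools import groupby
--
--
-- def _label_counts_from_map(sensor_label_map: dict[str, list[str]]) -> dict[str, int]: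
--     """Count sensors per label by sorting the flattened cleaned tokens and
--     run-length counting with groupby (keys come out already sorted)."""
--     toks = sorted(s for labels in sensor_label_map.values()
--                   for lab in labels
--                   if (s := str(lab).strip()))
--     return {k: sum(1 for _ in g) for k, g in groupby(toks)}
-- ===== Notes on version B (the rewrite author's own statement) =====
-- stated objective: alternative
-- what changed: Replaces the hash-map counting loop plus final sort of items by flattening the cleaned tokens into one list, sorting it, and run-length counting the sorted list with itertools.groupby, which yields the pairs already in key order.
import Mathlib
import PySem

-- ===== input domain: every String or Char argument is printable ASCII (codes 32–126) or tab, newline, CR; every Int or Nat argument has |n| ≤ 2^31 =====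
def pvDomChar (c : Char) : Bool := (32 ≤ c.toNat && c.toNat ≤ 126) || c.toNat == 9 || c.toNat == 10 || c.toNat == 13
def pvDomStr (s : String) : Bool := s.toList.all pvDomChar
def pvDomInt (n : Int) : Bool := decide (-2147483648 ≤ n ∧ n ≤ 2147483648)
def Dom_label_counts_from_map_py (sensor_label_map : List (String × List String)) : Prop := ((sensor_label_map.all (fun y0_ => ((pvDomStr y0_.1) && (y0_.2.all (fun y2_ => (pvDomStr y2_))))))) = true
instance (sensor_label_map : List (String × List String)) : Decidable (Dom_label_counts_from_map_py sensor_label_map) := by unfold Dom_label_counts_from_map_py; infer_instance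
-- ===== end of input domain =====

-- B replaces A's dict-counting loop + final sort by sort-then-groupby over the flattened
-- cleaned tokens (alternative algorithm of similar cost; return value proved identical).


-- ===== PORT A =====
-- counts has distinct keys, so Python's tuple sort of counts.items() is the stable sort by first component.
def label_counts_from_map_py (sensor_label_map : List (String × List String)) : List (String × Int) :=
  let counts : PySem.Dict String Int :=
    ((PySem.Dict.ofList sensor_label_map).values).foldl
      (fun counts labels =>
        labels.foldl
          (fun counts lab =>
            let s := PySem.Str.strip lab
            if s = "" then counts else counts.insert s (counts.getD s 0 + 1))
          counts)
      PySem.Dict.empty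
  PySem.List.sorted counts.items (fun p => p.1) false

-- ===== PORT B =====
def pvClean (lab : String) : Option String :=
  let s := PySem.Str.strip lab
  if s = "" then none else some s

-- one run of groupby: x is the current key, n the count accumulated so far
def pvGo (x : String) (n : Int) : List String → List (String × Int)
  | [] => [(x, n)]
  | y :: ys => if y = x then pvGo x (n + 1) ys else (x, n) :: pvGo y 1 ys

def pvGroupCounts : List String → List (String × Int)
  | [] => []
  | x :: xs => pvGo x 1 xs

def label_counts_from_map_py_alt (sensor_label_map : List (String × List String)) : List (String × Int) :=
  let toks := PySem.List.sorted
    (((PySem.Dict.ofList sensor_label_map).values).flatMap (fun labels => labels.filterMap pvClean))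
    (fun x => x) false
  pvGroupCounts toks

-- ===== PRECONDITION & SPEC =====
def Spec_label_counts_from_map_py (sensor_label_map : List (String × List String)) (out : List (String × Int)) : Prop := out = label_counts_from_map_py_alt sensor_label_map
instance (sensor_label_map : List (String × List String)) (out : List (String × Int)) : Decidable (Spec_label_counts_from_map_py sensor_label_map out) := by unfold Spec_label_counts_from_map_py; infer_instance

-- ===== CLAIM (what is proved, stated in full; the proofs are below) =====
def Claim_equal_label_counts_from_map_py : Prop := ∀ (sensor_label_map : List (String × List String)), Dom_label_counts_from_map_py sensor_label_map → Spec_label_counts_from_map_py sensor_label_map (label_counts_from_map_py sensor_label_map)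

-- ===== LEMMAS AND PROOFS =====

-- the flattened cleaned token list both ports read off the dict's values
def pvToks (sensor_label_map : List (String × List String)) : List String :=
  ((PySem.Dict.ofList sensor_label_map).values).flatMap (fun labels => labels.filterMap pvClean)

-- A's inner loop over one label list equals a fold over the cleaned tokens of that list
theorem pv_inner_fold (labels : List String) (c : PySem.Dict String Int) :
    labels.foldl
      (fun counts lab =>
        let s := PySem.Str.strip lab
        if s = "" then counts else counts.insert s (counts.getD s 0 + 1)) c
    = (labels.filterMap pvClean).foldl (fun counts s => counts.insert s (counts.getD s 0 + 1)) c := by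
  induction labels generalizing c with
  | nil => rfl
  | cons lab rest ih =>
    by_cases h : PySem.Str.strip lab = ""
    · have hc : pvClean lab = none := by simp [pvClean, h]
      simp only [List.foldl_cons, List.filterMap_cons, hc, h, if_true]
      exact ih c
    · have hc : pvClean lab = some (PySem.Str.strip lab) := by simp [pvClean, h]
      simp only [List.foldl_cons, List.filterMap_cons, hc, h, if_false]
      exact ih _

-- A's dict of counts is Counter(toks)
theorem pv_counts_eq_counter (m : List (String × List String)) :
    ((PySem.Dict.ofList m).values).foldl
      (fun counts labels =>
        labels.foldl
          (fun counts lab =>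
            let s := PySem.Str.strip lab
            if s = "" then counts else counts.insert s (counts.getD s 0 + 1))
          counts)
      PySem.Dict.empty
    = PySem.Dict.counter (pvToks m) := by
  conv_rhs => rw [← PySem.Dict.foldl_insert_getD_add_one_eq_counter, pvToks, List.foldl_flatMap]
  exact PySem.List.foldl_congr_mem _ _ _ _ (fun c labels _ => pv_inner_fold labels c)

-- PySem.Set.add / foldl: dedup generalities --------------------------------------------------

theorem pv_foldl_add_append (l s : List String) :
    List.foldl PySem.Set.add s l
      = s ++ List.foldl PySem.Set.add [] (l.filter (fun a => ¬ a ∈ s)) := by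
  match l with
  | [] => simp
  | x :: l =>
    by_cases hx : x ∈ s
    · have hadd : PySem.Set.add s x = s := by
        simp [PySem.Set.add, PySem.Set.contains, hx]
      rw [List.filter_cons_of_neg (by simpa using hx), List.foldl_cons, hadd,
          pv_foldl_add_append l s]
    · have hadd : PySem.Set.add s x = s ++ [x] := by
        simp [PySem.Set.add, PySem.Set.contains, hx]
      rw [List.filter_cons_of_pos (by simpa using hx), List.foldl_cons, hadd,
          pv_foldl_add_append l (s ++ [x])]
      have hstep : List.foldl PySem.Set.add [] (x :: l.filter (fun a => ¬ a ∈ s))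
          = List.foldl PySem.Set.add [x] (l.filter (fun a => ¬ a ∈ s)) := by
        simp [PySem.Set.add, PySem.Set.contains]
      rw [hstep, pv_foldl_add_append (l.filter (fun a => ¬ a ∈ s)) [x],
          List.filter_filter]
      have hfil : l.filter (fun a => decide (¬ a ∈ [x]) && decide (¬ a ∈ s))
          = l.filter (fun a => ¬ a ∈ s ++ [x]) := by
        apply List.filter_congr
        intro a _
        simp [And.comm]
      rw [hfil, List.append_assoc]
termination_by l.length
decreasing_by
  all_goals simp
  all_goals exact List.length_filter_le _ _

theorem pv_dedup_cons (a : String) (l : List String) :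
    PySem.List.dedup (a :: l) = a :: PySem.List.dedup (l.filter (fun y => ¬ y = a)) := by
  show List.foldl PySem.Set.add PySem.Set.empty (a :: l) = _
  have h0 : List.foldl PySem.Set.add PySem.Set.empty (a :: l)
      = List.foldl PySem.Set.add [a] l := by
    simp [PySem.Set.add, PySem.Set.contains, PySem.Set.empty]
  rw [h0, pv_foldl_add_append]
  show [a] ++ _ = a :: PySem.List.dedup _
  have : l.filter (fun y => ¬ y ∈ [a]) = l.filter (fun y => ¬ y = a) := by
    apply List.filter_congr; intro b _; simp
  rw [this]; rfl

theorem pv_foldl_add_sublist (l s : List String) :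
    (List.foldl PySem.Set.add s l).Sublist (s ++ l) := by
  induction l generalizing s with
  | nil => simp
  | cons x l ih =>
    simp only [List.foldl_cons]
    by_cases hx : x ∈ s
    · have : PySem.Set.add s x = s := by simp [PySem.Set.add, PySem.Set.contains, hx]
      rw [this]
      exact (ih s).trans (by simp)
    · have : PySem.Set.add s x = s ++ [x] := by simp [PySem.Set.add, PySem.Set.contains, hx]
      rw [this]
      have := ih (s ++ [x])
      simpa using this

theorem pv_dedup_sublist (l : List String) : (PySem.List.dedup l).Sublist l := by
  have := pv_foldl_add_sublist l []
  simpa [PySem.List.dedup, PySem.Set.ofList, PySem.Set.empty] using this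

-- characterisation of pvGo on a sorted run --------------------------------------------------

theorem pv_go_char (xs : List String) (x : String) (n : Int)
    (h : (x :: xs).Pairwise (· ≤ ·)) :
    pvGo x n xs
      = (x, n + (xs.count x : Int))
          :: (PySem.List.dedup (xs.filter (fun y => ¬ y = x))).map
              (fun k => (k, (xs.count k : Int))) := by
  induction xs generalizing x n with
  | nil => simp [pvGo, PySem.List.dedup, PySem.Set.ofList, PySem.Set.empty]
  | cons y ys ih =>
    rcases List.pairwise_cons.mp h with ⟨hxall, htail⟩
    by_cases hyx : y = x
    · subst hyx
      have h' : (y :: ys).Pairwise (· ≤ ·) := by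
        refine List.pairwise_cons.mpr ⟨?_, (List.pairwise_cons.mp htail).2⟩
        intro a ha; exact hxall a (List.mem_cons_of_mem _ ha)
      have hfil : (y :: ys).filter (fun z => ¬ z = y) = ys.filter (fun z => ¬ z = y) := by
        simp
      simp only [pvGo]
      rw [ih y (n + 1) h', hfil]
      have hmap : (PySem.List.dedup (ys.filter (fun z => ¬ z = y))).map
            (fun k => ((k, (ys.count k : Int)) : String × Int))
          = (PySem.List.dedup (ys.filter (fun z => ¬ z = y))).map
            (fun k => (k, ((y :: ys).count k : Int))) := by
        apply List.map_congr_left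
        intro k hk
        have hkne : ¬ k = y := by
          have hmem := (PySem.List.mem_dedup _ _).mp hk
          have := (List.mem_filter.mp hmem).2
          simpa using this
        have hky : ¬ y = k := fun e => hkne e.symm
        simp [hky]
      rw [hmap]
      have hfst : n + 1 + (ys.count y : Int) = n + ((y :: ys).count y : Int) := by
        rw [List.count_cons_self]; push_cast; ring
      rw [hfst]
      simp
    · have hxy : x < y := lt_of_le_of_ne (hxall y List.mem_cons_self) (fun e => hyx e.symm)
      have hxnot : x ∉ y :: ys := by
        intro hmem
        have hyx2 : y ≤ x := by
          rcases List.mem_cons.mp hmem with e | hmem'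
          · exact le_of_eq e.symm
          · exact (List.pairwise_cons.mp htail).1 x hmem'
        exact absurd hxy (not_lt.mpr hyx2)
      have hcx : (y :: ys).count x = 0 := List.count_eq_zero.mpr hxnot
      have hfx : (y :: ys).filter (fun z => ¬ z = x) = y :: ys := by
        apply List.filter_eq_self.mpr
        intro z hz
        simp only [decide_eq_true_eq]
        intro e; exact hxnot (e ▸ hz)
      simp only [pvGo, if_neg hyx]
      rw [ih y 1 htail, hfx, pv_dedup_cons, hcx]
      have hmap : (PySem.List.dedup (ys.filter (fun z => ¬ z = y))).map
            (fun k => ((k, (ys.count k : Int)) : String × Int))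
          = (PySem.List.dedup (ys.filter (fun z => ¬ z = y))).map
            (fun k => (k, ((y :: ys).count k : Int))) := by
        apply List.map_congr_left
        intro k hk
        have hkne : ¬ k = y := by
          have hmem := (PySem.List.mem_dedup _ _).mp hk
          have := (List.mem_filter.mp hmem).2
          simpa using this
        have hky : ¬ y = k := fun e => hkne e.symm
        simp [hky]
      rw [hmap]
      have hfst : (1 : Int) + (ys.count y : Int) = ((y :: ys).count y : Int) := by
        rw [List.count_cons_self]; push_cast; ring
      rw [hfst]
      simp [List.map_cons]

theorem pv_groupCounts_char (l : List String) (h : l.Pairwise (· ≤ ·)) :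
    pvGroupCounts l = (PySem.List.dedup l).map (fun k => (k, (l.count k : Int))) := by
  cases l with
  | nil => rfl
  | cons x xs =>
    show pvGo x 1 xs = _
    rw [pv_go_char xs x 1 h, pv_dedup_cons]
    have hmap : (PySem.List.dedup (xs.filter (fun z => ¬ z = x))).map
          (fun k => ((k, (xs.count k : Int)) : String × Int))
        = (PySem.List.dedup (xs.filter (fun z => ¬ z = x))).map
          (fun k => (k, ((x :: xs).count k : Int))) := by
      apply List.map_congr_left
      intro k hk
      have hkne : ¬ k = x := by
        have hmem := (PySem.List.mem_dedup _ _).mp hk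
        have := (List.mem_filter.mp hmem).2
        simpa using this
      have hkx : ¬ x = k := fun e => hkne e.symm
      simp [hkx]
    rw [hmap]
    have hfst : (1 : Int) + (xs.count x : Int) = ((x :: xs).count x : Int) := by
      rw [List.count_cons_self]; push_cast; ring
    rw [hfst]
    simp [List.map_cons]

-- main proof --------------------------------------------------------------------------------

theorem pv_main (m : List (String × List String)) :
    label_counts_from_map_py m = label_counts_from_map_py_alt m := by
  unfold label_counts_from_map_py label_counts_from_map_py_alt
  simp only []
  rw [pv_counts_eq_counter m, PySem.Dict.items_counter]
  set toks := pvToks m with htoks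
  set stoks := PySem.List.sorted toks (fun x => x) false with hstoks
  have hperm_st : stoks.Perm toks := PySem.List.sorted_perm toks _ false
  have hsortTail : stoks.Pairwise (· ≤ ·) := by
    have := PySem.List.sorted_pairwise toks (fun x => x)
    simpa using this
  have hB : pvGroupCounts stoks
      = (PySem.List.dedup stoks).map (fun k => (k, (toks.count k : Int))) := by
    rw [pv_groupCounts_char stoks hsortTail]
    apply List.map_congr_left
    intro k _
    rw [hperm_st.count_eq]
  -- the ys we hand to sorted_eq_of_perm_of_pairwise_lt
  have hpermDedup : (PySem.List.dedup stoks).Perm (PySem.Set.ofList toks) := by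
    apply List.perm_of_nodup_nodup_toFinset_eq (PySem.List.nodup_dedup _)
      (by rw [← PySem.List.dedup_eq_ofList]; exact PySem.List.nodup_dedup _)
    apply Finset.ext
    intro a
    simp only [List.mem_toFinset, PySem.List.mem_dedup, PySem.Set.mem_ofList]
    exact ⟨fun ha => hperm_st.mem_iff.mp ha, fun ha => hperm_st.mem_iff.mpr ha⟩
  have hpermYs :
      ((PySem.List.dedup stoks).map (fun k => (k, (toks.count k : Int)))).Perm
        ((PySem.Set.ofList toks).map (fun k => (k, (toks.count k : Int)))) :=
    hpermDedup.map _
  have hlt : ((PySem.List.dedup stoks).map (fun k => (k, (toks.count k : Int)))).Pairwise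
      (fun a b => a.1 < b.1) := by
    rw [List.pairwise_map]
    have hle : (PySem.List.dedup stoks).Pairwise (· ≤ ·) :=
      List.Pairwise.sublist (pv_dedup_sublist stoks) hsortTail
    have hne : (PySem.List.dedup stoks).Pairwise (· ≠ ·) :=
      List.nodup_iff_pairwise_ne.mp (PySem.List.nodup_dedup _)
    have := hle.and hne
    exact this.imp (fun ⟨h1, h2⟩ => lt_of_le_of_ne h1 h2)
  rw [PySem.List.sorted_eq_of_perm_of_pairwise_lt _ _ _ hpermYs hlt, ← hB]
  rfl

-- ===== VERDICT (by name: the statement is the Claim_ definition above) =====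
theorem label_counts_from_map_py_spec : Claim_equal_label_counts_from_map_py := by
  intro m _
  show _ = _
  exact pv_main m
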